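-- pv_equiv track=rewrite | github.com/johnsmithm/ner-accidente | scripts/nlp/utils.py | bars2spacy
-- ===== SOURCE A (Python) =====
-- def bars2spacy(text_bars):
--     """
--     input: a ||b|| c ||d|| e
--     output: [(2,3,'LOC_ACCIDENT'), (4,5,'LOC_ACCIDENT')]
--     """
--     split_phrase = text_bars.split()
--     start_len = 0
--     enteties_per_phrase = []
--     for word in split_phrase:
--         x = word.startswith("||")
--         if x: # IF X IS TRUE
--             START_ENT_POS = start_len
--             FINISH_ENT_POS = start_len + (len(word)-4) # -4 so that we take into account the bars
--             enteties_per_phrase.append((START_ENT_POS,FINISH_ENT_POS,'LOC_ACCIDENT'))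
--             start_len += (len(word)-3) # -3 because of the space before the word
--         else:
--             start_len += (len(word)+1)
--
--     return enteties_per_phrase
-- ===== SOURCE B (Python) =====
-- def bars2spacy(text_bars):
--     words = text_bars.split()
--     starts = [0]
--     for w in words:
--         starts.append(starts[-1] + (len(w) - 3 if w.startswith('||') else len(w) + 1))
--     return [(s, s + len(w) - 4, 'LOC_ACCIDENT')
--             for w, s in zip(words, starts) if w.startswith('||')]
-- ===== Notes on version B (the rewrite author's own statement) =====
-- stated objective: alternative
-- what changed: Replaced the single stateful fold (running offset + conditional append) by a two-phase decomposition: first a prefix-sum list of start offsets, then a filter+map comprehension over zip(words, starts).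
import Mathlib
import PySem

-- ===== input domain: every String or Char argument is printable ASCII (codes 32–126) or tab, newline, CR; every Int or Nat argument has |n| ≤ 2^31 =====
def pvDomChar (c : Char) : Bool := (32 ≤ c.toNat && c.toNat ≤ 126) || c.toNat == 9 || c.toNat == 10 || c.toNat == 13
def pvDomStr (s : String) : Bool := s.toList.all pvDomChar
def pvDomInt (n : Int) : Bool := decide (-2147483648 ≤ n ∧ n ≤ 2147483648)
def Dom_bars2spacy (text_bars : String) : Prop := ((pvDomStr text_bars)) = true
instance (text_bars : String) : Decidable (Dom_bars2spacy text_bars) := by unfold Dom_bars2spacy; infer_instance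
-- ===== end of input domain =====

-- B replaces A's single stateful fold by a prefix-sum-of-starts pass followed by a
-- filter+map over zip(words, starts); same O(n) cost, different decomposition.


-- ===== PORT A =====
-- literal port of A: one foldl over the split words carrying (start_len, enteties_per_phrase)
def bars2spacyStep (st : Int × List (Int × Int × String)) (word : String) :
    Int × List (Int × Int × String) :=
  if PySem.Str.startswith word "||" then
    (st.1 + (PySem.Str.len word - 3),
     st.2 ++ [(st.1, st.1 + (PySem.Str.len word - 4), "LOC_ACCIDENT")])
  else
    (st.1 + (PySem.Str.len word + 1), st.2)

def bars2spacy (text_bars : String) : List (Int × Int × String) :=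
  let split_phrase := PySem.Str.split₀ text_bars
  (split_phrase.foldl bars2spacyStep (0, [])).2

-- ===== PORT B =====
-- per-word start-offset increment
def bars2spacyInc (w : String) : Int :=
  if PySem.Str.startswith w "||" then PySem.Str.len w - 3 else PySem.Str.len w + 1

-- port of B: prefix sums of the increments (the 'starts' list built by the loop),
-- then a filter+map over zip(words, starts)
def bars2spacy_alt (text_bars : String) : List (Int × Int × String) :=
  let words := PySem.Str.split₀ text_bars
  let starts := words.scanl (fun a w => a + bars2spacyInc w) 0
  ((words.zip starts).filter (fun p => PySem.Str.startswith p.1 "||")).map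
    (fun p => (p.2, p.2 + PySem.Str.len p.1 - 4, "LOC_ACCIDENT"))

-- ===== PRECONDITION & SPEC =====
def Spec_bars2spacy (text_bars : String) (out : List (Int × Int × String)) : Prop := out = bars2spacy_alt text_bars
instance (text_bars : String) (out : List (Int × Int × String)) : Decidable (Spec_bars2spacy text_bars out) := by unfold Spec_bars2spacy; infer_instance

-- ===== CLAIM (what is proved, stated in full; the proofs are below) =====
def Claim_equal_bars2spacy : Prop := ∀ (text_bars : String), Dom_bars2spacy text_bars → Spec_bars2spacy text_bars (bars2spacy text_bars)

-- ===== LEMMAS AND PROOFS =====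
theorem bars2spacy_fold_eq (ws : List String) (st : Int) (acc : List (Int × Int × String)) :
    (ws.foldl bars2spacyStep (st, acc)).2 =
      acc ++ ((ws.zip (ws.scanl (fun a w => a + bars2spacyInc w) st)).filter
                (fun p => PySem.Str.startswith p.1 "||")).map
               (fun p => (p.2, p.2 + PySem.Str.len p.1 - 4, "LOC_ACCIDENT")) := by
  induction ws generalizing st acc with
  | nil => simp
  | cons w ws ih =>
    rw [List.scanl_cons]
    by_cases h : PySem.Chars.startswith w.toList ['|', '|']
    · simp [bars2spacyStep, bars2spacyInc, h, ih, add_sub_assoc]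
    · simp [bars2spacyStep, bars2spacyInc, h, ih]

-- ===== VERDICT (by name: the statement is the Claim_ definition above) =====
theorem bars2spacy_spec : Claim_equal_bars2spacy := by
  intro s _
  unfold Spec_bars2spacy bars2spacy bars2spacy_alt
  simpa using bars2spacy_fold_eq (PySem.Str.split₀ s) 0 []
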